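-- pv_equiv track=rewrite | github.com/kristaly-C/MesIntDRPYGY | VRPPD.py | splitForDelivery
-- ===== SOURCE A (Python) =====
-- def splitForDelivery(keyList: list, courier):
--     arr = []
--     rows = courier
--     for i in range(rows):
--         col=[]
--         for j in range(len(keyList)):
--             if j % courier == i :
--                 col.append(keyList[j])
--         arr.append(col)
--     return arr
-- ===== SOURCE B (Python) =====
-- def splitForDelivery(keyList: list, courier):
--     # bucket i is the strided slice starting at i with step courier:
--     # one strided pass per bucket instead of scanning the whole list with a modulo test
--     return [keyList[i::courier] for i in range(courier)]
-- ===== Notes on version B (the rewrite author's own statement) =====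
-- stated objective: faster
-- what changed: Each bucket is produced by one strided slice keyList[i::courier] instead of A's full scan of keyList with a j % courier == i test per bucket, removing the O(courier*n) repeated scans.
import Mathlib
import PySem

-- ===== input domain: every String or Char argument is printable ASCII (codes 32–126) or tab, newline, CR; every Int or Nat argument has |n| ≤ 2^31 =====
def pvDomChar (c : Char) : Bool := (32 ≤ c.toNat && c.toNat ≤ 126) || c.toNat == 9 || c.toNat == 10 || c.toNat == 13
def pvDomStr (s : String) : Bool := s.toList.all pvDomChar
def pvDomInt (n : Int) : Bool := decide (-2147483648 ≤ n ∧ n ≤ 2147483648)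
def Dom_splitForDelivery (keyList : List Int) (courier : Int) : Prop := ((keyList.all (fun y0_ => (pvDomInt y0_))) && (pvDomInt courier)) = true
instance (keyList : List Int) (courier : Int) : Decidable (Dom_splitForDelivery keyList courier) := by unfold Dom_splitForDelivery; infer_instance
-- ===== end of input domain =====

-- B builds each courier bucket as one strided slice keyList[i::courier] instead of A's full scan with a modulo test per bucket.


-- ===== PORT A =====
-- arr = []; for i in range(courier): col = []; for j in range(len(keyList)):
--   if j % courier == i: col.append(keyList[j]); arr.append(col); return arr
-- (keyList[j] is always in range here, so pyGetD is exact)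
def splitForDelivery (keyList : List Int) (courier : Int) : List (List Int) :=
  (PySem.List.pyRange 0 courier 1).foldl
    (fun arr i =>
      arr ++ [(PySem.List.pyRange 0 (keyList.length : Int) 1).foldl
        (fun col j => if PySem.Int.mod j courier = i then col ++ [PySem.List.pyGetD keyList j 0] else col) []])
    []

-- ===== PORT B =====
-- return [keyList[i::courier] for i in range(courier)]
-- (inside the range the step courier is never 0, so the slice always succeeds; getD [] only discharges the Option)
def splitForDelivery_alt (keyList : List Int) (courier : Int) : List (List Int) :=
  (PySem.List.pyRange 0 courier 1).map
    (fun i => (PySem.List.slice? keyList (some i) none courier).getD [])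

-- ===== PRECONDITION & SPEC =====
def Spec_splitForDelivery (keyList : List Int) (courier : Int) (out : List (List Int)) : Prop := out = splitForDelivery_alt keyList courier
instance (keyList : List Int) (courier : Int) (out : List (List Int)) : Decidable (Spec_splitForDelivery keyList courier out) := by unfold Spec_splitForDelivery; infer_instance

-- ===== CLAIM (what is proved, stated in full; the proofs are below) =====
def Claim_equal_splitForDelivery : Prop := ∀ (keyList : List Int) (courier : Int), Dom_splitForDelivery keyList courier → Spec_splitForDelivery keyList courier (splitForDelivery keyList courier)

-- ===== LEMMAS AND PROOFS =====

-- how many indices j with 0 ≤ j < n satisfy j ≡ i (mod c): the ceiling ((n - i + c - 1) / c), for 0 ≤ i < c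
def pvCnt (n : Nat) (i c : Int) : Nat := (((n : Int) - i + c - 1) / c).toNat

lemma pv_div_aux (r q c : Int) (hc : 0 < c) (h0 : 0 ≤ r) (h1 : r < c) : (r + q * c) / c = q := by
  rw [Int.add_mul_ediv_right _ _ (by omega : c ≠ 0), Int.ediv_eq_zero_of_lt h0 h1, zero_add]

lemma pv_ceil_dvd (m c : Int) (hc : 0 < c) (h : c ∣ m) : (m + c - 1) / c = m / c := by
  obtain ⟨q, rfl⟩ := h
  rw [show c * q + c - 1 = (c - 1) + q * c by ring, pv_div_aux _ _ _ hc (by omega) (by omega),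
    Int.mul_ediv_cancel_left _ (by omega)]

lemma pv_ceil_succ (m c : Int) (hc : 0 < c) :
    (m + 1 + c - 1) / c = (m + c - 1) / c + (if c ∣ m then 1 else 0) := by
  by_cases h : c ∣ m
  · obtain ⟨q, rfl⟩ := h
    rw [pv_ceil_dvd _ _ hc ⟨q, rfl⟩, show c * q + 1 + c - 1 = 0 + (q + 1) * c by ring,
      pv_div_aux _ _ _ hc (by omega) (by omega), Int.mul_ediv_cancel_left _ (by omega), if_pos ⟨q, rfl⟩]
  · have hr0 : 0 ≤ m % c := Int.emod_nonneg m (by omega)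
    have hr1 : m % c < c := Int.emod_lt_of_pos m hc
    have hrne : m % c ≠ 0 := fun h0 => h (Int.dvd_of_emod_eq_zero h0)
    have hm : c * (m / c) + m % c = m := Int.mul_ediv_add_emod m c
    have key : (m / c + 1) * c = c * (m / c) + c := by ring
    rw [show m + 1 + c - 1 = (m % c) + (m / c + 1) * c by omega,
      show m + c - 1 = (m % c - 1) + (m / c + 1) * c by omega,
      pv_div_aux _ _ _ hc (by omega) (by omega), pv_div_aux _ _ _ hc (by omega) (by omega), if_neg h]
    ring

lemma pv_mod_iff_dvd (n i c : Int) (hi : 0 ≤ i) (hic : i < c) :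
    PySem.Int.mod n c = i ↔ c ∣ (n - i) := by
  have hc : 0 < c := by omega
  rw [PySem.Int.mod_eq_emod_of_pos hc]
  have hb0 : 0 ≤ n % c := Int.emod_nonneg n (by omega)
  have hb1 : n % c < c := Int.emod_lt_of_pos n hc
  have hrep : n % c - i = (n - i) - c * (n / c) := by
    have := Int.mul_ediv_add_emod n c; omega
  constructor
  · intro h
    exact ⟨n / c, by omega⟩
  · intro h
    have h2 : c ∣ (n % c - i) := by rw [hrep]; exact dvd_sub h ⟨n / c, rfl⟩
    have := Int.eq_zero_of_abs_lt_dvd h2 (by rw [abs_lt]; constructor <;> omega)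
    omega

lemma pv_filter_mod_range (c i : Int) (hi : 0 ≤ i) (hic : i < c) (n : Nat) :
    (PySem.List.pyRange 0 (n : Int) 1).filter (fun j => decide (PySem.Int.mod j c = i))
      = (List.range (pvCnt n i c)).map (fun (k : Nat) => i + c * (k : Int)) := by
  have hc : 0 < c := by omega
  induction n with
  | zero =>
    have h0 : pvCnt 0 i c = 0 := by
      unfold pvCnt
      rw [show ((0:Nat):Int) - i + c - 1 = -i + c - 1 by push_cast; ring,
        Int.ediv_eq_zero_of_lt (by omega) (by omega)]
      rfl
    simp [PySem.List.pyRange_one_eq_nil (le_refl (0:Int)), h0]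
  | succ n ih =>
    have hcast : ((n + 1 : Nat) : Int) = (n : Int) + 1 := by push_cast; ring
    rw [hcast, PySem.List.pyRange_one_succ_right (by positivity), List.filter_append, ih]
    have hceil := pv_ceil_succ ((n:Int) - i) c hc
    have hdnn : (0:Int) ≤ ((n:Int) - i + c - 1) / c := Int.ediv_nonneg (by omega) (by omega)
    by_cases hmod : PySem.Int.mod (n : Int) c = i
    · have hdvd : c ∣ ((n:Int) - i) := (pv_mod_iff_dvd _ _ _ hi hic).mp hmod
      have hcnt : pvCnt (n+1) i c = pvCnt n i c + 1 := by
        unfold pvCnt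
        rw [show ((n+1:Nat):Int) - i + c - 1 = ((n:Int) - i) + 1 + c - 1 by push_cast; ring,
          hceil, if_pos hdvd, show ((n:Int) - i + c - 1) = ((n:Int) - i) + c - 1 by ring]
        omega
      have hmn : (0:Int) ≤ (n:Int) - i := by
        by_contra hneg
        rw [Int.not_le] at hneg
        have := Int.eq_zero_of_abs_lt_dvd hdvd (by rw [abs_lt]; constructor <;> omega)
        omega
      have hval : i + c * (pvCnt n i c : Int) = (n : Int) := by
        unfold pvCnt
        rw [show ((n:Int) - i + c - 1) = (((n:Int) - i) + c - 1) by ring,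
          pv_ceil_dvd _ _ hc hdvd,
          Int.toNat_of_nonneg (Int.ediv_nonneg hmn (by omega)),
          Int.mul_ediv_cancel' hdvd]
        ring
      rw [hcnt, List.range_succ, List.map_append, List.map_singleton, hval]
      simp [List.filter, hmod]
    · have hdvd : ¬ c ∣ ((n:Int) - i) := fun h => hmod ((pv_mod_iff_dvd _ _ _ hi hic).mpr h)
      have hcnt : pvCnt (n+1) i c = pvCnt n i c := by
        unfold pvCnt
        rw [show ((n+1:Nat):Int) - i + c - 1 = ((n:Int) - i) + 1 + c - 1 by push_cast; ring,
          hceil, if_neg hdvd, show ((n:Int) - i + c - 1) = ((n:Int) - i) + c - 1 by ring]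
        omega
      rw [hcnt]
      simp [List.filter, hmod]

lemma pv_cnt_index_lt (n : Nat) (i c : Int) (hi : 0 ≤ i) (hic : i < c) (k : Nat)
    (hk : k < pvCnt n i c) : i + c * (k : Int) < (n : Int) ∧ 0 ≤ i + c * (k : Int) := by
  have hc : 0 < c := by omega
  have h := Int.mul_ediv_add_emod ((n:Int) - i + c - 1) c
  have h2 := Int.emod_nonneg ((n:Int) - i + c - 1) (show c ≠ 0 by omega)
  unfold pvCnt at hk
  have hkq : (k:Int) < ((n:Int) - i + c - 1) / c := by omega
  have h1 : c * (k:Int) ≤ c * (((n:Int) - i + c - 1) / c - 1) :=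
    mul_le_mul_of_nonneg_left (by omega) (le_of_lt hc)
  constructor
  · nlinarith [h, h2, h1]
  · positivity

lemma pv_slice_eq (xs : List Int) (c i : Int) (hi : 0 ≤ i) (hic : i < c) :
    (PySem.List.slice? xs (some i) none c).getD []
      = (List.range (pvCnt xs.length i c)).map (fun (k : Nat) => PySem.List.pyGetD xs (i + c * (k : Int)) 0) := by
  have hc : 0 < c := by omega
  simp only [PySem.List.slice?, PySem.List.sliceIndices, if_neg (show ¬ c = 0 by omega),
    if_neg (show ¬ c < 0 by omega)]
  simp only [if_neg (show ¬ i < 0 by omega), if_pos hc]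
  by_cases hin : i < (xs.length : Int)
  · rw [min_eq_left (le_of_lt hin), if_pos hin, Option.getD_some]
    apply List.filterMap_eq_map_iff_forall_eq_some.mpr
    intro k hk
    rw [List.mem_range] at hk
    obtain ⟨hlt, hge⟩ := pv_cnt_index_lt xs.length i c hi hic k hk
    rw [List.getElem?_eq_getElem (show (i + c * (k:Int)).toNat < xs.length by omega),
      PySem.List.pyGetD_eq_getElem xs 0 hge hlt]
  · rw [min_eq_right (by omega), if_neg (lt_irrefl _)]
    have h0 : pvCnt xs.length i c = 0 := by
      unfold pvCnt
      rw [Int.ediv_eq_zero_of_lt (by omega) (by omega)]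
      rfl
    simp [h0]

-- A's inner loop over bucket i equals B's strided slice
lemma pv_bucket_eq (keyList : List Int) (c i : Int) (hi : 0 ≤ i) (hic : i < c) :
    (PySem.List.pyRange 0 (keyList.length : Int) 1).foldl
      (fun col j => if PySem.Int.mod j c = i then col ++ [PySem.List.pyGetD keyList j 0] else col) []
    = (PySem.List.slice? keyList (some i) none c).getD [] := by
  have h1 := PySem.List.foldl_append_if (fun j => decide (PySem.Int.mod j c = i))
    (fun j => PySem.List.pyGetD keyList j 0) (PySem.List.pyRange 0 (keyList.length : Int) 1) []
  simp only [decide_eq_true_eq] at h1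
  rw [h1, List.nil_append, pv_filter_mod_range c i hi hic keyList.length, List.map_map,
    pv_slice_eq keyList c i hi hic]
  rfl

-- ===== VERDICT (by name: the statement is the Claim_ definition above) =====
theorem splitForDelivery_spec : Claim_equal_splitForDelivery := by
  intro keyList courier _
  unfold Spec_splitForDelivery splitForDelivery splitForDelivery_alt
  rw [PySem.List.foldl_append_singleton_eq_map, List.nil_append]
  apply List.map_congr_left
  intro i hmem
  obtain ⟨hi0, hic⟩ := PySem.List.mem_pyRange_one.mp hmem
  exact pv_bucket_eq keyList courier i hi0 hic
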